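-- pv_equiv track=rewrite | github.com/Quisl/AdventOfCode2020 | day/14/solution.py | calcValue
-- ===== SOURCE A (Python) =====
-- def calcValue(mask, value):
--     binvalue = bin(int(value))[2:]
--     while len(binvalue) != len(mask):
--         binvalue = "0" + binvalue
--     for i in range(len(mask) - 1, -1, -1):
--         if mask[i] == "X":
--             pass
--         if mask[i] == "0":
--             binvaluelist = list(binvalue)
--             binvaluelist[i] = "0"
--             binvalue = "".join(binvaluelist)
--         if mask[i] == "1":
--             binvaluelist = list(binvalue)
--             binvaluelist[i] = "1"
--             binvalue = "".join(binvaluelist)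
--     return int(binvalue, 2)
-- ===== SOURCE B (Python) =====
-- def calcValue(mask, value):
--     # One arithmetic pass over the mask, LSB first: no binary string is built or rebuilt.
--     result = 0
--     v = value
--     weight = 1
--     for c in reversed(mask):
--         b = v % 2
--         v = v // 2
--         if c == '1':
--             b = 1
--         elif c == '0':
--             b = 0
--         result += b * weight
--         weight *= 2
--     return result
-- ===== Notes on version B (the rewrite author's own statement) =====
-- stated objective: alternative
-- what changed: B replaces A's binary-string construction, per-index list(...)/join rebuilds and final int(s,2) parse with a single arithmetic pass over the mask that extracts each bit of value by divmod and accumulates the masked bits with a running weight.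
-- outside the precondition, e.g. on calcValue('XX', 7): A does not finish within the time limit, B returns 3; on calcValue('X1', -1): A raises ValueError, B returns 3; on calcValue('0XX', -3): A returns 3, B returns 1
import Mathlib
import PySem

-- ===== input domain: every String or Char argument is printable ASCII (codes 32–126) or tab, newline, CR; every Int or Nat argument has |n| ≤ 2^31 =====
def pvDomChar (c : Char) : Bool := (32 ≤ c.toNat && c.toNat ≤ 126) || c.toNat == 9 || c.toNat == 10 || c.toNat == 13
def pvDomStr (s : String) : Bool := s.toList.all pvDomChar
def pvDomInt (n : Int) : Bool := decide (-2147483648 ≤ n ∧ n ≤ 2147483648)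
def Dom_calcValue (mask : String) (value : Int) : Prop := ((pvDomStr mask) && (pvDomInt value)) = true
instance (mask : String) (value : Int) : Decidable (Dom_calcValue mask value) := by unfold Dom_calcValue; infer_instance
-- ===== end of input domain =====

-- B replaces A's binary-string building and per-index list/join rebuilds by one arithmetic
-- divmod pass over the mask (objective: alternative).

-- ===== PORT A =====
-- the digit loop inside Python's bin(v) for v > 0 (MSB first); hand-ported, PySem has no lemma-level bin
def pvBinNat (v : Nat) : List Char :=
  if h : v = 0 then []
  else pvBinNat (v / 2) ++ [if v % 2 = 1 then '1' else '0']
decreasing_by exact Nat.div_lt_self (Nat.pos_of_ne_zero h) one_lt_two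

-- bin(int(value))[2:], hand-ported step for step (exact, including the 'b…' remnant for negatives)
def pvBinSlice (value : Int) : List Char :=
  if value < 0 then 'b' :: pvBinNat value.natAbs
  else if value = 0 then ['0']
  else pvBinNat value.toNat

-- while len(binvalue) != len(mask): binvalue = "0" + binvalue
-- Python DIVERGES when the string is longer than the mask (that case is outside Pre_;
-- this total port returns the string unchanged there).
def pvPad (n : Nat) (s : List Char) : List Char :=
  if s.length = n then s
  else if h : s.length < n then pvPad n ('0' :: s)
  else s
termination_by n - s.length
decreasing_by simp; omega

-- the body of A's for-loop: the three ifs over mask[i], each rebuilding the list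
def pvBody (m : List Char) (s : List Char) (i : Int) : List Char :=
  let mi := PySem.List.pyGetD m i ' '   -- mask[i]; every index the loop visits is in range
  let s1 := if mi = 'X' then s else s
  let s2 := if mi = '0' then PySem.List.pySetD s1 i '0' else s1
  if mi = '1' then PySem.List.pySetD s2 i '1' else s2

def calcValue (mask : String) (value : Int) : Int :=
  let m := mask.toList
  let binvalue := pvPad m.length (pvBinSlice value)
  let final :=
    (PySem.List.pyRange ((m.length : Int) - 1) (-1) (-1)).foldl (pvBody m) binvalue
  -- int(binvalue, 2): exact under Pre_, where every char of `final` is '0' or '1'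
  final.foldl (fun a c => 2 * a + if c = '1' then 1 else 0) 0

-- ===== PORT B =====
def calcValue_alt (mask : String) (value : Int) : Int :=
  (mask.toList.reverse.foldl
    (fun (st : Int × Int × Int) c =>
      let b := PySem.Int.mod st.2.1 2
      let v := PySem.Int.floordiv st.2.1 2
      let b' := if c = '1' then (1 : Int) else if c = '0' then 0 else b
      (st.1 + b' * st.2.2, v, st.2.2 * 2))
    (0, value, 1)).1

-- ===== PRECONDITION & SPEC =====
-- Pre_ excludes empty masks and values outside [0, 2^len(mask)): there A's padding loop diverges,
-- int(...,2) raises ValueError on the 'b…' remnant of bin(), or (for a few negatives whose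
-- remnant happens to be masked over) A returns an accidental value read off the mangled string.
def Pre_calcValue (mask : String) (value : Int) : Prop :=
  0 ≤ value ∧ value < 2 ^ mask.toList.length ∧ 1 ≤ mask.toList.length
instance (mask : String) (value : Int) : Decidable (Pre_calcValue mask value) := by
  unfold Pre_calcValue; infer_instance

def pvWitness_calcValue : String × Int := ("X10", 5)

def Spec_calcValue (mask : String) (value : Int) (out : Int) : Prop := out = calcValue_alt mask value
instance (mask : String) (value : Int) (out : Int) : Decidable (Spec_calcValue mask value out) := by
  unfold Spec_calcValue; infer_instance

-- ===== CLAIM (what is proved, stated in full; the proofs are below) =====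
def Claim_equal_calcValue : Prop := ∀ (mask : String) (value : Int), Dom_calcValue mask value → Pre_calcValue mask value → Spec_calcValue mask value (calcValue mask value)

-- ===== LEMMAS AND PROOFS =====

-- int(s, 2) on '0'/'1' strings, as the fold Port A ends with
def pvInt2 (s : List Char) : Int := s.foldl (fun a c => 2 * a + if c = '1' then 1 else 0) 0

def pvBit (c : Char) : Int := if c = '1' then 1 else 0

-- the per-position effect of A's masking loop
def pvG (mc b : Char) : Char := if mc = '0' then '0' else if mc = '1' then '1' else b

-- the LSB-first masked-bit recursion both ports are reduced to
def pvFB : List Char → Int → Int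
  | [], _ => 0
  | c :: r, v =>
      (if c = '1' then 1 else if c = '0' then 0 else PySem.Int.mod v 2)
        + 2 * pvFB r (PySem.Int.floordiv v 2)

theorem pvInt2_append_singleton (s : List Char) (c : Char) :
    pvInt2 (s ++ [c]) = 2 * pvInt2 s + pvBit c := by
  simp [pvInt2, pvBit, List.foldl_append]

theorem pvInt2_nonneg (s : List Char) : 0 ≤ pvInt2 s := by
  suffices h : ∀ (t : List Char) (a : Int), 0 ≤ a →
      0 ≤ t.foldl (fun a c => 2 * a + if c = '1' then 1 else 0) a from h s 0 le_rfl
  intro t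
  induction t with
  | nil => intro a ha; simpa using ha
  | cons c r ih => intro a ha; simp only [List.foldl_cons]; exact ih _ (by split <;> omega)

theorem pvInt2_replicate (k : Nat) (s : List Char) :
    pvInt2 (List.replicate k '0' ++ s) = pvInt2 s := by
  induction k with
  | zero => simp
  | succ k ih => simpa [pvInt2, List.replicate_succ] using ih

theorem pvBinNat_all01 (v : Nat) : ∀ c ∈ pvBinNat v, c = '0' ∨ c = '1' := by
  induction v using Nat.strong_induction_on with
  | _ v ih =>
      by_cases h : v = 0
      · rw [pvBinNat, dif_pos h]; simp
      · intro c hc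
        rw [pvBinNat, dif_neg h] at hc
        rcases List.mem_append.1 hc with h1 | h2
        · exact ih (v / 2) (Nat.div_lt_self (Nat.pos_of_ne_zero h) one_lt_two) c h1
        · simp only [List.mem_singleton] at h2
          subst h2
          split <;> simp

theorem pvBinNat_int2 (v : Nat) : pvInt2 (pvBinNat v) = (v : Int) := by
  induction v using Nat.strong_induction_on with
  | _ v ih =>
      by_cases h : v = 0
      · rw [pvBinNat, dif_pos h]; simp [pvInt2, h]
      · rw [pvBinNat, dif_neg h, pvInt2_append_singleton,
          ih (v / 2) (Nat.div_lt_self (Nat.pos_of_ne_zero h) one_lt_two)]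
        have h2 : pvBit (if v % 2 = 1 then '1' else '0') = ((v % 2 : Nat) : Int) := by
          rcases Nat.mod_two_eq_zero_or_one v with h' | h' <;> simp [pvBit, h']
        rw [h2]
        omega

theorem pvBinNat_len (k v : Nat) (h : v < 2 ^ k) : (pvBinNat v).length ≤ k := by
  induction k generalizing v with
  | zero =>
      have hv : v = 0 := by omega
      rw [pvBinNat, dif_pos hv]; simp
  | succ k ih =>
      by_cases h0 : v = 0
      · rw [pvBinNat, dif_pos h0]; simp
      · rw [pvBinNat, dif_neg h0]
        have hp : (2 : Nat) ^ (k + 1) = 2 * 2 ^ k := by ring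
        have := ih (v := v / 2) (by omega)
        simp only [List.length_append, List.length_cons, List.length_nil]
        omega

theorem pvPad_eq (n : Nat) : ∀ (d : Nat) (s : List Char), n - s.length = d → s.length ≤ n →
    pvPad n s = List.replicate (n - s.length) '0' ++ s := by
  intro d
  induction d with
  | zero =>
      intro s h0 hle
      have he : s.length = n := by omega
      rw [pvPad, if_pos he]
      simp [he]
  | succ d ih =>
      intro s h0 hle
      have hlt : s.length < n := by omega
      rw [pvPad, if_neg (by omega), dif_pos hlt,
        ih ('0' :: s) (by simp; omega) (by simp; omega)]
      have h1 : n - s.length = (n - ('0' :: s).length) + 1 := by simp; omega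
      rw [h1, List.replicate_succ']
      simp

theorem pvLoop (m : List Char) : ∀ (k : Nat) (s : List Char), s.length = m.length → k ≤ m.length →
    (PySem.List.pyRange ((k : Int) - 1) (-1) (-1)).foldl (pvBody m) s
    = List.zipWith pvG (m.take k) (s.take k) ++ s.drop k := by
  intro k
  induction k with
  | zero =>
      intro s _ _
      rw [show ((0 : Nat) : Int) - 1 = -1 by norm_num, PySem.List.pyRange_neg_one_eq_nil le_rfl]
      simp
  | succ k ih =>
      intro s hs hk
      have hkm : k < m.length := by omega
      have hks : k < s.length := by omega
      have hcast : ((k + 1 : Nat) : Int) - 1 = (k : Nat) := by push_cast; ring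
      rw [hcast, PySem.List.pyRange_neg_one_cons (by omega), List.foldl_cons]
      have hget : PySem.List.pyGetD m ((k : Nat) : Int) ' ' = m[k] := by
        rw [PySem.List.pyGetD_natCast, List.getD_eq_getElem?_getD, List.getElem?_eq_getElem hkm]
        rfl
      have hbody : pvBody m s ((k : Nat) : Int)
          = if m[k] = '0' then s.set k '0' else if m[k] = '1' then s.set k '1' else s := by
        unfold pvBody
        simp only [hget, PySem.List.pySetD_natCast, ite_self]
        split_ifs <;> simp_all
      rw [hbody]
      set s' := if m[k] = '0' then s.set k '0' else if m[k] = '1' then s.set k '1' else s with hs'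
      have hlen' : s'.length = m.length := by
        rw [hs']; split_ifs <;> simp [hs]
      have htake : s'.take k = s.take k := by
        have h1 : ∀ c : Char, (s.set k c).take k = s.take k := by
          intro c
          rw [List.take_set]
          exact List.set_eq_of_length_le (by simp [hks.le])
        rw [hs']; split_ifs <;> simp [h1]
      have hdrop : s'.drop k = pvG m[k] s[k] :: s.drop (k + 1) := by
        have hds : s.drop k = s[k] :: s.drop (k + 1) := List.drop_eq_getElem_cons hks
        have h1 : ∀ c : Char, (s.set k c).drop k = c :: s.drop (k + 1) := by
          intro c
          rw [List.drop_set, if_neg (by omega), Nat.sub_self, hds]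
          rfl
        rw [hs']
        unfold pvG
        split_ifs <;> simp_all
      rw [ih s' hlen' (by omega), htake, hdrop]
      have hmtake : m.take (k + 1) = m.take k ++ [m[k]] := by
        rw [List.take_add_one, List.getElem?_eq_getElem hkm]; rfl
      have hstake : s.take (k + 1) = s.take k ++ [s[k]] := by
        rw [List.take_add_one, List.getElem?_eq_getElem hks]; rfl
      rw [hmtake, hstake, List.zipWith_append (by simp [hks.le, hkm.le])]
      simp

theorem pvZip (m : List Char) : ∀ (bits : List Char), bits.length = m.length →
    (∀ c ∈ bits, c = '0' ∨ c = '1') →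
    pvInt2 (List.zipWith pvG m bits) = pvFB m.reverse (pvInt2 bits) := by
  induction m using List.reverseRecOn with
  | nil =>
      intro bits h _
      have : bits = [] := List.eq_nil_of_length_eq_zero (by simpa using h)
      subst this
      simp [pvInt2, pvFB]
  | append_singleton m' c ih =>
      intro bits hlen hall
      have hb : bits ≠ [] := by
        intro h; subst h; simp at hlen
      obtain ⟨b', d, rfl⟩ : ∃ b' d, bits = b' ++ [d] :=
        ⟨bits.dropLast, bits.getLast hb, (List.dropLast_append_getLast hb).symm⟩
      have hlen' : m'.length = b'.length := by simpa using hlen.symm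
      have hd : pvBit d = 0 ∨ pvBit d = 1 := by
        rcases hall d (by simp) with h | h <;> simp [pvBit, h]
      have hw : 0 ≤ pvInt2 b' := pvInt2_nonneg b'
      have hv : pvInt2 (b' ++ [d]) = 2 * pvInt2 b' + pvBit d := pvInt2_append_singleton b' d
      have hmod : PySem.Int.mod (pvInt2 (b' ++ [d])) 2 = pvBit d := by
        rw [hv, PySem.Int.mod_eq_emod_of_pos (by norm_num)]; omega
      have hdiv : PySem.Int.floordiv (pvInt2 (b' ++ [d])) 2 = pvInt2 b' := by
        rw [hv, PySem.Int.floordiv_eq_ediv_of_pos (by norm_num)]; omega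
      have hih := ih b' hlen'.symm (fun x hx => hall x (by simp [hx]))
      have hbitg : pvBit (pvG c d) = if c = '1' then 1 else if c = '0' then 0 else pvBit d := by
        by_cases h0 : c = '0' <;> by_cases h1 : c = '1' <;> simp_all [pvG, pvBit]
      rw [List.zipWith_append hlen', List.reverse_append]
      simp only [List.reverse_cons, List.reverse_nil, List.nil_append, List.singleton_append,
        List.zipWith_cons_cons, List.zipWith_nil]
      rw [pvInt2_append_singleton, pvFB, hmod, hdiv, hih, hbitg]
      ring

theorem pvFoldB (r : List Char) : ∀ (res v w : Int),
    (r.foldl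
      (fun (st : Int × Int × Int) c =>
        let b := PySem.Int.mod st.2.1 2
        let v := PySem.Int.floordiv st.2.1 2
        let b' := if c = '1' then (1 : Int) else if c = '0' then 0 else b
        (st.1 + b' * st.2.2, v, st.2.2 * 2))
      (res, v, w)).1 = res + pvFB r v * w := by
  induction r with
  | nil => intro res v w; simp [pvFB]
  | cons c t ih =>
      intro res v w
      simp only [List.foldl_cons]
      rw [ih]
      simp only [pvFB]
      ring

-- facts about bin(int(value))[2:] for 0 ≤ value < 2^n, 1 ≤ n
theorem pvBinSlice_all01 (value : Int) (h0 : 0 ≤ value) :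
    ∀ c ∈ pvBinSlice value, c = '0' ∨ c = '1' := by
  unfold pvBinSlice
  rw [if_neg (by omega)]
  split
  · simp
  · exact pvBinNat_all01 value.toNat

theorem pvBinSlice_int2 (value : Int) (h0 : 0 ≤ value) :
    pvInt2 (pvBinSlice value) = value := by
  unfold pvBinSlice
  rw [if_neg (by omega)]
  split
  · simp [pvInt2]; omega
  · rw [pvBinNat_int2]; omega

theorem pvBinSlice_len (value : Int) (n : Nat) (h0 : 0 ≤ value) (h1 : 1 ≤ n)
    (h2 : value < 2 ^ n) : (pvBinSlice value).length ≤ n := by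
  unfold pvBinSlice
  rw [if_neg (by omega)]
  split
  · simpa using h1
  · refine pvBinNat_len n value.toNat ?_
    have hc : ((2 ^ n : Nat) : Int) = 2 ^ n := by push_cast; ring
    omega

-- ===== VERDICT (by name: the statement is the Claim_ definition above) =====
theorem calcValue_spec : Claim_equal_calcValue := by
  intro mask value _ hpre
  obtain ⟨h0, h2, h1⟩ := hpre
  unfold Spec_calcValue
  set m := mask.toList with hm
  set bits := pvPad m.length (pvBinSlice value) with hbits
  have hslen : (pvBinSlice value).length ≤ m.length := pvBinSlice_len value m.length h0 h1 h2
  have hpad : bits = List.replicate (m.length - (pvBinSlice value).length) '0' ++ pvBinSlice value :=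
    pvPad_eq m.length (m.length - (pvBinSlice value).length) (pvBinSlice value) rfl hslen
  have hblen : bits.length = m.length := by rw [hpad]; simp; omega
  have hball : ∀ c ∈ bits, c = '0' ∨ c = '1' := by
    intro c hc
    rw [hpad] at hc
    rcases List.mem_append.1 hc with h | h
    · left; exact List.eq_of_mem_replicate h
    · exact pvBinSlice_all01 value h0 c h
  have hbint : pvInt2 bits = value := by
    rw [hpad, pvInt2_replicate, pvBinSlice_int2 value h0]
  have hloop := pvLoop m m.length bits hblen le_rfl
  have ht1 : m.take m.length = m := List.take_length
  have ht2 : bits.take m.length = bits := by rw [← hblen]; exact List.take_length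
  have ht3 : bits.drop m.length = [] := by rw [← hblen]; exact List.drop_length
  rw [ht1, ht2, ht3, List.append_nil] at hloop
  have hzip := pvZip m bits hblen hball
  rw [hbint] at hzip
  have hA : calcValue mask value = pvInt2 (List.zipWith pvG m bits) := by
    show pvInt2 ((PySem.List.pyRange ((m.length : Int) - 1) (-1) (-1)).foldl (pvBody m) bits) = _
    rw [hloop]
  have hB : calcValue_alt mask value = 0 + pvFB m.reverse value * 1 := by
    unfold calcValue_alt
    exact pvFoldB mask.toList.reverse 0 value 1
  rw [hA, hB, hzip]
  ring
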